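-- pv_equiv track=rewrite | github.com/kumaravinashm/Python-Question | Random/freq_my.py | possibleSameCharFreqByOneRemoval
-- ===== SOURCE A (Python) =====
-- def possibleSameCharFreqByOneRemoval(s):
--     all_freq = {}
--     for i in s:
--         if i in all_freq:
--             all_freq[i] += 1
--         else:
--             all_freq[i] = 1
--     lst = [int(i) for i in all_freq.values()]
--     maxi = max(lst)
--     if all(x == lst[0] for x in lst):
--         return maxi
--     else:
--         lst = [x-1 for x in lst]
--         if 0 in lst and lst.count(0)==1:
--             lst.remove(0)
--             if all(x == lst[0] for x in lst):
--                 return maxi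
-- ===== SOURCE B (Python) =====
-- def possibleSameCharFreqByOneRemoval(s):
--     counts = {}
--     for c in s:
--         counts[c] = counts.get(c, 0) + 1
--     hist = {}
--     for v in counts.values():
--         hist[v] = hist.get(v, 0) + 1
--     maxi = max(counts.values())
--     if len(hist) == 1:
--         return maxi
--     if hist.get(1) == 1 and len(hist) == 2:
--         return maxi
-- ===== Notes on version B (the rewrite author's own statement) =====
-- stated objective: idiomatic
-- what changed: Instead of decrementing the frequency list, removing a single zero and rescanning it, B builds a frequency-of-frequencies histogram and decides by its shape: one key, or exactly the keys {1, v} with the count 1 occurring once.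
import Mathlib
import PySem

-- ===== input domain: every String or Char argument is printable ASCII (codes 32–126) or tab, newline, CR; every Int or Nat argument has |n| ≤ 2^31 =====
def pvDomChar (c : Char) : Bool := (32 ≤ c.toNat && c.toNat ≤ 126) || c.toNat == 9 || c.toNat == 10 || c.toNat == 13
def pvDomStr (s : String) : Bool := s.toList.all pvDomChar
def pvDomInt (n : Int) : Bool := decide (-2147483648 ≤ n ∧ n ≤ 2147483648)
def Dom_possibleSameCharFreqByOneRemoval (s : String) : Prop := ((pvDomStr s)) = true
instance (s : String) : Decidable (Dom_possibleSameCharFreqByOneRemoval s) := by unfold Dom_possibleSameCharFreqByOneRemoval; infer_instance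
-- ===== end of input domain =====

-- B replaces A's decrement/remove-zero/rescan of the frequency list by a frequency-of-frequencies
-- histogram whose shape decides the answer (idiomatic; same asymptotic cost).


-- ===== PORT A =====
def possibleSameCharFreqByOneRemoval (s : String) : Option Int :=
  let all_freq := s.toList.foldl (fun d i =>
      if d.contains i then d.insert i (d.getD i 0 + 1) else d.insert i 1) PySem.Dict.empty
  let lst := all_freq.values  -- int(i) is the identity on the int values
  match PySem.List.max? lst (fun x => x) with
  | none => none  -- max([]) raises ValueError; excluded by Pre_
  | some maxi =>
    if lst.all (fun x => PySem.List.pyGet? lst 0 == some x) then some maxi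
    else
      let lst2 := lst.map (fun x => x - 1)
      if lst2.contains 0 && PySem.List.count lst2 0 == 1 then
        match PySem.List.remove? lst2 0 with
        | none => none  -- unreachable: 0 ∈ lst2 was just checked
        | some lst3 =>
          if lst3.all (fun x => PySem.List.pyGet? lst3 0 == some x) then some maxi
          else none
      else none

-- ===== PORT B =====
def possibleSameCharFreqByOneRemoval_alt (s : String) : Option Int :=
  let counts := s.toList.foldl (fun d c => d.insert c (d.getD c 0 + 1)) PySem.Dict.empty
  let hist := counts.values.foldl (fun d v => d.insert v (d.getD v 0 + 1)) PySem.Dict.empty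
  match PySem.List.max? counts.values (fun x => x) with
  | none => none  -- max([]) raises ValueError; excluded by Pre_
  | some maxi =>
    if hist.size == 1 then some maxi
    else if hist.get? 1 == some (1 : Int) && hist.size == 2 then some maxi
    else none

-- ===== PRECONDITION & SPEC =====
-- Pre_ excludes only the empty string, on which A (and B) raise ValueError from max([]).
def Pre_possibleSameCharFreqByOneRemoval (s : String) : Prop := s ≠ ""
instance (s : String) : Decidable (Pre_possibleSameCharFreqByOneRemoval s) := by unfold Pre_possibleSameCharFreqByOneRemoval; infer_instance
def pvWitness_possibleSameCharFreqByOneRemoval : String := "aab"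
def Spec_possibleSameCharFreqByOneRemoval (s : String) (out : Option Int) : Prop := out = possibleSameCharFreqByOneRemoval_alt s
instance (s : String) (out : Option Int) : Decidable (Spec_possibleSameCharFreqByOneRemoval s out) := by unfold Spec_possibleSameCharFreqByOneRemoval; infer_instance

-- ===== CLAIM (what is proved, stated in full; the proofs are below) =====
def Claim_equal_possibleSameCharFreqByOneRemoval : Prop := ∀ (s : String), Dom_possibleSameCharFreqByOneRemoval s → Pre_possibleSameCharFreqByOneRemoval s → Spec_possibleSameCharFreqByOneRemoval s (possibleSameCharFreqByOneRemoval s)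

-- ===== LEMMAS AND PROOFS =====

lemma freqA_eq_counter (l : List Char) :
    l.foldl (fun d i => if d.contains i then d.insert i (d.getD i 0 + 1) else d.insert i 1)
      PySem.Dict.empty = PySem.Dict.counter l := by
  rw [← PySem.Dict.foldl_insert_getD_add_one_eq_counter]
  congr 1
  funext d i
  by_cases hc : d.contains i
  · simp [hc]
  · simp only [hc, Bool.false_eq_true, if_false]
    rw [PySem.Dict.getD_of_not_contains d 0 (by simpa using hc)]
    norm_num

lemma size_counter (L : List Int) :
    (PySem.Dict.counter L).size = (PySem.List.dedup L).length := by
  simp [PySem.Dict.size, PySem.Dict.items_counter, PySem.List.dedup_eq_ofList]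

lemma len_one_of_nodup (l : List Int) (h : Int) (hnd : l.Nodup) (hm : h ∈ l) :
    l.length = 1 ↔ ∀ x ∈ l, x = h := by
  match l with
  | [] => simp at hm
  | a :: r =>
    constructor
    · intro hlen x hx
      have hr : r = [] := by
        cases r with
        | nil => rfl
        | cons b s => simp at hlen
      subst hr
      simp at hx hm; omega
    · intro hall
      have ha : a = h := hall a List.mem_cons_self
      cases r with
      | nil => rfl
      | cons b s =>
        have hb : b = h := hall b (by simp)
        rw [ha, hb] at hnd
        simp at hnd

lemma dedup_len_one (h : Int) (t : List Int) :
    (PySem.List.dedup (h :: t)).length = 1 ↔ ∀ x ∈ h :: t, x = h := by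
  rw [len_one_of_nodup _ h (PySem.List.nodup_dedup _)
      ((PySem.List.mem_dedup _ _).2 List.mem_cons_self)]
  constructor
  · intro hall x hx; exact hall x ((PySem.List.mem_dedup _ _).2 hx)
  · intro hall x hx; exact hall x ((PySem.List.mem_dedup _ _).1 hx)

lemma count_map_sub_one (L : List Int) :
    List.count 0 (L.map (fun x => x - 1)) = List.count 1 L := by
  induction L with
  | nil => rfl
  | cons x t ih =>
    simp only [List.map_cons, List.count_cons, ih]
    by_cases hx : x = 1
    · simp [hx]
    · have h0 : ¬ (x - 1 = 0) := by omega
      simp [hx, h0]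

lemma erase_map_sub_one (L : List Int) :
    (L.map (fun x => x - 1)).erase 0 = (L.erase 1).map (fun x => x - 1) := by
  induction L with
  | nil => rfl
  | cons x t ih =>
    by_cases hx : x = 1
    · simp [hx]
    · have h0 : ¬ (x - 1 = 0) := by omega
      simp [hx, h0, ih]

lemma get?_counter_one (L : List Int) :
    ((PySem.Dict.counter L).get? 1 == some (1 : Int)) = true ↔ List.count 1 L = 1 := by
  have hD := PySem.Dict.getD_counter L 1
  cases hg : (PySem.Dict.counter L).get? 1 with
  | none =>
    rw [PySem.Dict.getD_of_get?_eq_none _ _ hg] at hD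
    constructor
    · intro h; exact absurd h (by decide)
    · intro h; rw [h] at hD; simp at hD
  | some v =>
    rw [PySem.Dict.getD_of_get?_eq_some _ _ hg] at hD
    simp only [beq_iff_eq, Option.some.injEq]
    omega

lemma dedup_length_eq_card (L : List Int) :
    (PySem.List.dedup L).length = L.toFinset.card := by
  have hfs : (PySem.List.dedup L).toFinset = L.toFinset := by
    ext x; simp [List.mem_toFinset]
  rw [← hfs, List.toFinset_card_of_nodup (PySem.List.nodup_dedup L)]

lemma headI_mem_int (l : List Int) (h : l ≠ []) : l.headI ∈ l := by
  cases l with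
  | nil => exact absurd rfl h
  | cons a r => simp

lemma two_values_iff (h : Int) (t : List Int) (hc : List.count 1 (h :: t) = 1) :
    ((h :: t).erase 1 ≠ [] ∧ ∀ x ∈ (h :: t).erase 1, x = ((h :: t).erase 1).headI)
      ↔ (PySem.List.dedup (h :: t)).length = 2 := by
  set E := (h :: t).erase 1 with hE
  have hmem1 : (1 : Int) ∈ h :: t := List.count_pos_iff.mp (by omega)
  have hnotE : (1 : Int) ∉ E := by
    intro hmem
    have h1 := List.count_erase_self (a := (1 : Int)) (l := h :: t)
    have hpos := List.count_pos_iff.mpr hmem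
    rw [← hE] at h1; omega
  have hperm : (h :: t).Perm (1 :: E) := List.perm_cons_erase hmem1
  have hfin : (h :: t).toFinset = insert 1 E.toFinset := by
    rw [List.toFinset_eq_of_perm _ _ hperm, List.toFinset_cons]
  have hcard : (h :: t).toFinset.card = E.toFinset.card + 1 := by
    rw [hfin, Finset.card_insert_of_notMem (by simpa using hnotE)]
  rw [dedup_length_eq_card, hcard]
  constructor
  · rintro ⟨hne, hall⟩
    have hset : E.toFinset = {E.headI} := by
      ext x
      simp only [List.mem_toFinset, Finset.mem_singleton]
      exact ⟨hall x, fun hx => hx ▸ headI_mem_int E hne⟩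
    rw [hset]; simp
  · intro hcard2
    have hc1 : E.toFinset.card = 1 := by omega
    obtain ⟨a, ha⟩ := Finset.card_eq_one.mp hc1
    have hne : E ≠ [] := by
      intro h0; rw [h0] at ha
      exact absurd ha.symm (Finset.singleton_ne_empty a)
    refine ⟨hne, fun x hx => ?_⟩
    have hxa : x = a := by
      have := List.mem_toFinset.mpr hx; rw [ha] at this; simpa using this
    have hha : E.headI = a := by
      have := List.mem_toFinset.mpr (headI_mem_int E hne); rw [ha] at this; simpa using this
    rw [hxa, hha]

lemma main_rest (h : Int) (t : List Int) (m : Int) :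
    (if (h :: t).all (fun x => PySem.List.pyGet? (h :: t) 0 == some x) then some m
     else
      if ((h :: t).map (fun x => x - 1)).contains 0
          && PySem.List.count ((h :: t).map (fun x => x - 1)) 0 == 1 then
        match PySem.List.remove? ((h :: t).map (fun x => x - 1)) 0 with
        | none => (none : Option Int)
        | some lst3 =>
          if lst3.all (fun x => PySem.List.pyGet? lst3 0 == some x) then some m else none
      else none)
    = (if (PySem.Dict.counter (h :: t)).size == 1 then some m
       else if (PySem.Dict.counter (h :: t)).get? 1 == some (1 : Int)
                && (PySem.Dict.counter (h :: t)).size == 2 then some m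
       else none) := by
  have hall_iff : ((h :: t).all (fun x => PySem.List.pyGet? (h :: t) 0 == some x) = true)
      ↔ (∀ x ∈ h :: t, x = h) := by
    simp only [List.all_eq_true, PySem.List.pyGet?_zero_cons, beq_iff_eq, Option.some.injEq]
    exact ⟨fun H x hx => (H x hx).symm, fun H x hx => (H x hx).symm⟩
  have hsize1 : (((PySem.Dict.counter (h :: t)).size == 1) = true) ↔ (∀ x ∈ h :: t, x = h) := by
    rw [beq_iff_eq, size_counter]; exact dedup_len_one h t
  by_cases hP : ∀ x ∈ h :: t, x = h
  · rw [if_pos (hall_iff.mpr hP), if_pos (hsize1.mpr hP)]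
  · rw [if_neg (fun hx => hP (hall_iff.mp hx)), if_neg (fun hx => hP (hsize1.mp hx))]
    by_cases hc1 : List.count 1 (h :: t) = 1
    · -- exactly one value equal to 1
      have hmem1 : (1 : Int) ∈ h :: t := List.count_pos_iff.mp (by omega)
      have hmem0 : (0 : Int) ∈ (h :: t).map (fun x => x - 1) :=
        List.mem_map.mpr ⟨1, hmem1, by norm_num⟩
      have hcontains : ((h :: t).map (fun x => x - 1)).contains 0 = true := by
        simpa using hmem0
      have hcount : (PySem.List.count ((h :: t).map (fun x => x - 1)) 0 == 1) = true := by
        rw [PySem.List.count_eq, count_map_sub_one, hc1]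
        rfl
      have hget : ((PySem.Dict.counter (h :: t)).get? 1 == some (1 : Int)) = true :=
        (get?_counter_one (h :: t)).mpr hc1
      rw [hcontains, hcount, hget,
          PySem.List.remove?_eq_some_erase _ 0 hmem0, erase_map_sub_one]
      -- E := (h :: t).erase 1 is nonempty (else h :: t = [1], all-equal, contradiction)
      have hEne : (h :: t).erase 1 ≠ [] := by
        intro hE
        have hlen := List.length_erase_of_mem hmem1
        rw [hE] at hlen
        have : t = [] := by simpa using hlen.symm
        subst this
        have h1 : (1 : Int) = h := by simpa using hmem1
        exact hP (by simp [← h1])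
      obtain ⟨e, r, hEr⟩ : ∃ e r, (h :: t).erase 1 = e :: r := by
        cases hE : (h :: t).erase 1 with
        | nil => exact absurd hE hEne
        | cons e r => exact ⟨e, r, rfl⟩
      have hAall : ((((h :: t).erase 1).map (fun x => x - 1)).all
          (fun x => PySem.List.pyGet? (((h :: t).erase 1).map (fun x => x - 1)) 0 == some x) = true)
          ↔ (∀ x ∈ (h :: t).erase 1, x = ((h :: t).erase 1).headI) := by
        rw [hEr]
        simp only [List.map_cons, PySem.List.pyGet?_zero_cons, List.all_eq_true,
          beq_iff_eq, Option.some.injEq, List.headI_cons]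
        constructor
        · intro H x hx
          rcases List.mem_cons.mp hx with hx | hx
          · exact hx
          · have := H (x - 1) (List.mem_cons_of_mem _ (List.mem_map.mpr ⟨x, hx, rfl⟩)); omega
        · intro H y hy
          rcases List.mem_cons.mp hy with hy | hy
          · omega
          · obtain ⟨x, hx, rfl⟩ := List.mem_map.mp hy
            have := H x (List.mem_cons_of_mem _ hx); omega
      have hsize2 : (((PySem.Dict.counter (h :: t)).size == 2) = true)
          ↔ (((h :: t).erase 1 ≠ []) ∧ ∀ x ∈ (h :: t).erase 1, x = ((h :: t).erase 1).headI) := by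
        rw [beq_iff_eq, size_counter]
        exact (two_values_iff h t hc1).symm
      simp only [Bool.and_self, Bool.true_and]
      rw [if_pos trivial]
      by_cases hA : ∀ x ∈ (h :: t).erase 1, x = ((h :: t).erase 1).headI
      · rw [if_pos (hAall.mpr hA), if_pos (hsize2.mpr ⟨hEne, hA⟩)]
      · rw [if_neg (fun hx => hA (hAall.mp hx)), if_neg (fun hx => hA (hsize2.mp hx).2)]
    · -- no (or several) values equal to 1: both sides fall through to none
      have hcount : (PySem.List.count ((h :: t).map (fun x => x - 1)) 0 == 1) = false := by
        rw [PySem.List.count_eq, count_map_sub_one]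
        simpa using hc1
      have hget : ((PySem.Dict.counter (h :: t)).get? 1 == some (1 : Int)) = false := by
        rcases hb : ((PySem.Dict.counter (h :: t)).get? 1 == some (1 : Int)) with _ | _
        · rfl
        · exact absurd ((get?_counter_one (h :: t)).mp hb) hc1
      rw [hcount, hget]
      simp


-- ===== VERDICT (by name: the statement is the Claim_ definition above) =====
theorem possibleSameCharFreqByOneRemoval_spec : Claim_equal_possibleSameCharFreqByOneRemoval := by
  intro s _hdom hpre
  unfold Spec_possibleSameCharFreqByOneRemoval possibleSameCharFreqByOneRemoval
    possibleSameCharFreqByOneRemoval_alt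
  simp only [freqA_eq_counter, PySem.Dict.foldl_insert_getD_add_one_eq_counter]
  have hs : s.toList ≠ [] := fun hnil => hpre (String.toList_eq_nil_iff.mp hnil)
  obtain ⟨c, cs, hcs⟩ : ∃ c cs, s.toList = c :: cs := by
    cases h : s.toList with
    | nil => exact absurd h hs
    | cons c cs => exact ⟨c, cs, rfl⟩
  have hvne : (PySem.Dict.counter s.toList).values ≠ [] := by
    have hmem : c ∈ PySem.Set.ofList s.toList := by
      rw [PySem.Set.mem_ofList, hcs]; exact List.mem_cons_self
    intro hv
    have : (PySem.Dict.counter s.toList).items = [] := by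
      have hk := congrArg List.length hv
      simpa [PySem.Dict.values] using hk
    rw [PySem.Dict.items_counter] at this
    rcases hof : PySem.Set.ofList s.toList with _ | _
    · rw [hof] at hmem; simp at hmem
    · rw [hof] at this; simp at this
  obtain ⟨h0, t0, hv⟩ : ∃ h0 t0, (PySem.Dict.counter s.toList).values = h0 :: t0 := by
    cases h : (PySem.Dict.counter s.toList).values with
    | nil => exact absurd h hvne
    | cons h0 t0 => exact ⟨h0, t0, rfl⟩
  simp only [hv, PySem.List.max?_id_cons]
  exact main_rest h0 t0 _
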